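-- pv_equiv track=rewrite | github.com/SestrenExsis/CodeKatas | adventofcode/AdventOfCode2019.py | get_field_map
-- ===== SOURCE A (Python) =====
-- def get_field_map(asteroids, source, target, vaporized, width=33, height=33):
--     field_map = []
--     for y in range(height):
--         current_row = ''
--         for x in range(width):
--             cell = '.'
--             if (x, y) == source:
--                 cell = 'S'
--             elif (x, y) == target:
--                 cell = 'T'
--             elif (x, y) in vaporized:
--                 cell = '*'
--             elif (x, y) in asteroids:
--                 cell = '#'
--             current_row += cell
--         field_map.append(current_row)
--     result = field_map
--     return result
-- ===== SOURCE B (Python) =====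
-- def get_field_map(asteroids, source, target, vaporized, width=33, height=33):
--     # Build one point->char index up front (reverse-priority inserts, later
--     # inserts overwrite), so the per-cell membership scans disappear.
--     marks = {}
--     for p in asteroids:
--         marks[p] = '#'
--     for p in vaporized:
--         marks[p] = '*'
--     marks[target] = 'T'
--     marks[source] = 'S'
--     return [''.join(marks.get((x, y), '.') for x in range(width))
--             for y in range(height)]
-- ===== Notes on version B (the rewrite author's own statement) =====
-- stated objective: faster
-- what changed: B builds a single point-to-char dict once (asteroids, then vaporized, then target, then source, later inserts overwriting to encode A's priority) and renders each cell with one hash lookup, instead of A's per-cell if-chain with linear membership scans of vaporized and asteroids.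
import Mathlib
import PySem

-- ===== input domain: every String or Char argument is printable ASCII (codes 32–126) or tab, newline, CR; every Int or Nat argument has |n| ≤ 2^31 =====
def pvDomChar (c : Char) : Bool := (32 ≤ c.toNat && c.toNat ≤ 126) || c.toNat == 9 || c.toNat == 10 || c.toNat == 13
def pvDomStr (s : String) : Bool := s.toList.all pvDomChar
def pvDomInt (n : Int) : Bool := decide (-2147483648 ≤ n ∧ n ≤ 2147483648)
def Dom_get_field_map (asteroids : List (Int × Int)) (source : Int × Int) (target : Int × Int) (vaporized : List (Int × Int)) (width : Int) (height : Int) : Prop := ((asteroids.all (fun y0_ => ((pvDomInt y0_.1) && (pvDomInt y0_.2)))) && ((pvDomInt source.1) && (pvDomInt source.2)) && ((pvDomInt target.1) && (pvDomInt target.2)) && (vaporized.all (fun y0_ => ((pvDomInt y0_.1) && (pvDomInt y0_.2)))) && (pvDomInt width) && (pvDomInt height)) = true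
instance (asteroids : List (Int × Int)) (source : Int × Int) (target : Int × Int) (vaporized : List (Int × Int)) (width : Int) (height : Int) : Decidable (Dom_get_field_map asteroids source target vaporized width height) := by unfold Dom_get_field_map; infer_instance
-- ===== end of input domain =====

-- B builds one point->char dict up front (reverse-priority inserts) and renders each
-- cell with a single lookup, replacing A's per-cell if-chain with membership scans.

-- ===== PORT A =====
def get_field_map (asteroids : List (Int × Int)) (source : Int × Int) (target : Int × Int) (vaporized : List (Int × Int)) (width : Int) (height : Int) : List String :=
  (PySem.List.pyRange 0 height 1).foldl (fun field_map y =>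
    let current_row : List Char := (PySem.List.pyRange 0 width 1).foldl (fun row x =>
      let cell : Char :=
        if (x, y) = source then 'S'
        else if (x, y) = target then 'T'
        else if (x, y) ∈ vaporized then '*'
        else if (x, y) ∈ asteroids then '#'
        else '.'
      row ++ [cell]) []
    field_map ++ [String.ofList current_row]) []

-- ===== PORT B =====
def get_field_map_alt (asteroids : List (Int × Int)) (source : Int × Int) (target : Int × Int) (vaporized : List (Int × Int)) (width : Int) (height : Int) : List String :=
  let m0 : PySem.Dict (Int × Int) Char := asteroids.foldl (fun d p => d.insert p '#') PySem.Dict.empty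
  let m1 : PySem.Dict (Int × Int) Char := vaporized.foldl (fun d p => d.insert p '*') m0
  let m2 : PySem.Dict (Int × Int) Char := (m1.insert target 'T').insert source 'S'
  (PySem.List.pyRange 0 height 1).map (fun y =>
    String.ofList ((PySem.List.pyRange 0 width 1).map (fun x => m2.getD (x, y) '.')))

-- ===== PRECONDITION & SPEC =====
def Spec_get_field_map (asteroids : List (Int × Int)) (source : Int × Int) (target : Int × Int) (vaporized : List (Int × Int)) (width : Int) (height : Int) (out : List String) : Prop := out = get_field_map_alt asteroids source target vaporized width height
instance (asteroids : List (Int × Int)) (source : Int × Int) (target : Int × Int) (vaporized : List (Int × Int)) (width : Int) (height : Int) (out : List String) : Decidable (Spec_get_field_map asteroids source target vaporized width height out) := by unfold Spec_get_field_map; infer_instance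

-- ===== CLAIM (what is proved, stated in full; the proofs are below) =====
def Claim_equal_get_field_map : Prop := ∀ (asteroids : List (Int × Int)) (source : Int × Int) (target : Int × Int) (vaporized : List (Int × Int)) (width : Int) (height : Int), Dom_get_field_map asteroids source target vaporized width height → Spec_get_field_map asteroids source target vaporized width height (get_field_map asteroids source target vaporized width height)

-- ===== LEMMAS AND PROOFS =====

-- A loop that appends one element per item is a map.
theorem foldl_snoc_eq_map {α β : Type} (f : α → β) (l : List α) (acc : List β) :
    l.foldl (fun r x => r ++ [f x]) acc = acc ++ l.map f := by
  induction l generalizing acc with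
  | nil => simp
  | cons a t ih => simp [List.foldl, ih]

-- Lookup in a dict after inserting every point of a list with the same value.
theorem getD_foldl_insert_const (l : List (Int × Int)) (c dflt : Char)
    (d : PySem.Dict (Int × Int) Char) (k : Int × Int) :
    (l.foldl (fun d p => d.insert p c) d).getD k dflt
      = if k ∈ l then c else d.getD k dflt := by
  induction l generalizing d with
  | nil => simp
  | cons a t ih =>
    simp only [List.foldl, ih, PySem.Dict.getD_insert, List.mem_cons]
    by_cases h1 : k ∈ t <;> by_cases h2 : k = a <;> simp [h1, h2]

theorem get_field_map_spec : Claim_equal_get_field_map := by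
  intro asteroids source target vaporized width height _
  show get_field_map asteroids source target vaporized width height
      = get_field_map_alt asteroids source target vaporized width height
  unfold get_field_map get_field_map_alt
  rw [foldl_snoc_eq_map
    (fun y => String.ofList ((PySem.List.pyRange 0 width 1).foldl (fun row x =>
      row ++ [if (x, y) = source then 'S'
        else if (x, y) = target then 'T'
        else if (x, y) ∈ vaporized then '*'
        else if (x, y) ∈ asteroids then '#'
        else '.']) []))]
  simp only [List.nil_append]
  refine List.map_congr_left (fun y _ => ?_)
  rw [foldl_snoc_eq_map]
  simp only [List.nil_append]
  refine congrArg String.ofList (List.map_congr_left (fun x _ => ?_))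
  rw [PySem.Dict.getD_insert, PySem.Dict.getD_insert,
      getD_foldl_insert_const, getD_foldl_insert_const]
  simp only [PySem.Dict.getD_empty]
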